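-- pv_equiv track=rewrite | github.com/wockd9600/algorithm_practice | 이것이 코딩테스트다(스터디)/1주차/화[그리디_예제]/5. 볼링공 고르기.py | ChoiceBall
-- ===== SOURCE A (Python) =====
-- def ChoiceBall(balls):
--     count = 0
--     # 현재 공의 무게
--     currentBall = balls[0]
--     # 현재 공의 무게와 같은 공의 개수 (현재 공은 포함x)
--     m = 0
--
--     # 시작
--     for i in range(len(balls)-1):
--         # 다음 공의 index
--         t = i + 1
--         # 만약 현재 공과 다음 공의 무게가 같다면
--         if currentBall == balls[t]:
--             m += 1
--             continue
--
--         # 다르다면 (1)과 (2)를 한다.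
--         count += len(balls[t:])
--         count += m * len(balls[t:])
--         currentBall = balls[t]
--         m = 0
--
--     return count
-- ===== SOURCE B (Python) =====
-- def ChoiceBall(balls):
--     # run lengths of maximal consecutive equal balls
--     runs = []
--     for x in balls:
--         if runs and x == prev:
--             runs[-1] += 1
--         else:
--             runs.append(1)
--         prev = x
--     n = len(balls)
--     return n * (n - 1) // 2 - sum(L * (L - 1) // 2 for L in runs)
-- ===== Notes on version B (the rewrite author's own statement) =====
-- stated objective: faster
-- what changed: Replaces A's per-boundary accumulation, which builds a suffix slice balls[t:] at every run boundary, with one grouping pass collecting run lengths and the closed form n*(n-1)//2 - sum(L*(L-1)//2).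
-- crash fix: A raises IndexError on the empty list (balls[0]); B returns 0 there. — e.g. on ChoiceBall([]): A raises IndexError, B returns 0
import Mathlib
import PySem

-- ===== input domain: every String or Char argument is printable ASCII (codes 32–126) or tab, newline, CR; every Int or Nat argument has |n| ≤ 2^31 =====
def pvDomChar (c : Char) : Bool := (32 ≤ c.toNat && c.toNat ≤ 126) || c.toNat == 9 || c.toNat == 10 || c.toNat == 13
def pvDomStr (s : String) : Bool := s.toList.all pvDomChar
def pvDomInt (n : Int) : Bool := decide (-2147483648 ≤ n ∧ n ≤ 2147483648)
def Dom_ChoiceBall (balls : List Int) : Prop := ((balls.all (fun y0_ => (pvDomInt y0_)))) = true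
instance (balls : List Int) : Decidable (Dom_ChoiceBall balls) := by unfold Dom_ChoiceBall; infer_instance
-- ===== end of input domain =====

-- B replaces A's per-boundary accumulation (which slices balls[t:] at each run boundary) with one
-- run-length grouping pass and the closed form n*(n-1)//2 - sum(L*(L-1)//2) (measured faster).

-- ===== PORT A =====
-- loop body of A's 'for i in range(len(balls)-1)'; state = (count, currentBall, m)
def pvAbody (balls : List Int) (s : Int × Int × Int) (i : Int) : Int × Int × Int :=
  let t := i + 1
  match PySem.List.pyGet? balls t with
  | none => s   -- unreachable: t = i+1 is always in range inside the loop
  | some bt =>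
    if s.2.1 == bt then (s.1, s.2.1, s.2.2 + 1)
    else (s.1 + ((PySem.List.slice balls (some t) none).length : Int)
              + s.2.2 * ((PySem.List.slice balls (some t) none).length : Int),
          bt, 0)

def ChoiceBall (balls : List Int) : Int :=
  match PySem.List.pyGet? balls 0 with
  | none => 0   -- Python raises IndexError here (balls[0] on []); excluded by Pre_
  | some b0 =>
    ((PySem.List.pyRange 0 ((balls.length : Int) - 1) 1).foldl (pvAbody balls) (0, b0, 0)).1

-- ===== PORT B =====
-- 'runs[-1] += 1'
def pvIncLast : List Int → List Int
  | [] => []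
  | [a] => [a + 1]
  | a :: b :: rest => a :: pvIncLast (b :: rest)

-- loop body of B's grouping pass; state = (runs, prev)
def pvBbody (s : List Int × Option Int) (x : Int) : List Int × Option Int :=
  if (!s.1.isEmpty) && (s.2 == some x) then (pvIncLast s.1, some x)
  else (s.1 ++ [1], some x)

def ChoiceBall_alt (balls : List Int) : Int :=
  let runs := (balls.foldl pvBbody ([], none)).1
  let n : Int := balls.length
  PySem.Int.floordiv (n * (n - 1)) 2
    - (runs.map (fun L => PySem.Int.floordiv (L * (L - 1)) 2)).sum

-- ===== PRECONDITION & SPEC =====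
-- Pre_ excludes only the empty list, on which Python A raises IndexError (balls[0]).
def Pre_ChoiceBall (balls : List Int) : Prop := balls ≠ []
instance (balls : List Int) : Decidable (Pre_ChoiceBall balls) := by unfold Pre_ChoiceBall; infer_instance
def pvWitness_ChoiceBall : List Int := [1, 1, 2]

-- A raises IndexError exactly on the empty list; B returns 0 there.
def Raises_ChoiceBall (balls : List Int) : Prop := balls = []
instance (balls : List Int) : Decidable (Raises_ChoiceBall balls) := by unfold Raises_ChoiceBall; infer_instance
def pvRaiseWitness_ChoiceBall : List Int := []
def pvRaiseWitnessOut_ChoiceBall : Int := 0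

def Spec_ChoiceBall (balls : List Int) (out : Int) : Prop := out = ChoiceBall_alt balls
instance (balls : List Int) (out : Int) : Decidable (Spec_ChoiceBall balls out) := by unfold Spec_ChoiceBall; infer_instance

-- ===== CLAIM (what is proved, stated in full; the proofs are below) =====
def Claim_equal_ChoiceBall : Prop := ∀ (balls : List Int), Dom_ChoiceBall balls → Pre_ChoiceBall balls → Spec_ChoiceBall balls (ChoiceBall balls)
def Claim_raises_ChoiceBall : Prop := (∀ (balls : List Int), Dom_ChoiceBall balls → Raises_ChoiceBall balls → ¬ Pre_ChoiceBall balls) ∧ (Dom_ChoiceBall (pvRaiseWitness_ChoiceBall) ∧ Raises_ChoiceBall (pvRaiseWitness_ChoiceBall) ∧ ChoiceBall_alt (pvRaiseWitness_ChoiceBall) = pvRaiseWitnessOut_ChoiceBall)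

-- ===== LEMMAS AND PROOFS =====

-- reference recursion for A's loop: g cur m rest = count added while scanning rest
def pvG : Int → Int → List Int → Int
  | _, _, [] => 0
  | cur, m, x :: xs =>
    if cur = x then pvG cur (m + 1) xs
    else ((xs.length : Int) + 1) + m * ((xs.length : Int) + 1) + pvG x 0 xs

-- reference recursion for B's run lengths: current value v, current run length c
def pvRuns : Int → Int → List Int → List Int
  | _, c, [] => [c]
  | v, c, x :: xs => if v = x then pvRuns v (c + 1) xs else c :: pvRuns x 1 xs

lemma pvIncLast_append (rs : List Int) (c : Int) : pvIncLast (rs ++ [c]) = rs ++ [c + 1] := by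
  induction rs with
  | nil => rfl
  | cons a rest ih =>
    cases rest with
    | nil => simp [pvIncLast]
    | cons b t => simpa [pvIncLast] using ih

lemma B_loop (xs : List Int) : ∀ (rs : List Int) (c v : Int),
    (xs.foldl pvBbody (rs ++ [c], some v)).1 = rs ++ pvRuns v c xs := by
  induction xs with
  | nil => intro rs c v; simp [pvRuns]
  | cons x t ih =>
    intro rs c v
    by_cases h : v = x
    · subst h
      have hb : pvBbody (rs ++ [c], some v) v = (rs ++ [c + 1], some v) := by
        simp [pvBbody, pvIncLast_append]
      rw [List.foldl_cons, hb, ih rs (c + 1) v]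
      simp [pvRuns]
    · have hne : (some v == some x) = false := by simp [h]
      simp only [List.foldl_cons, pvBbody, hne, Bool.and_false]
      simp only [pvRuns, if_neg h]
      calc ((t.foldl pvBbody ((rs ++ [c]) ++ [1], some x)).1)
          = (rs ++ [c]) ++ pvRuns x 1 t := ih (rs ++ [c]) 1 x
        _ = rs ++ (c :: pvRuns x 1 t) := by simp

lemma alt_cons (b0 : Int) (bs : List Int) :
    ChoiceBall_alt (b0 :: bs) =
      PySem.Int.floordiv ((((b0 :: bs).length : Int)) * (((b0 :: bs).length : Int) - 1)) 2
        - ((pvRuns b0 1 bs).map (fun L => PySem.Int.floordiv (L * (L - 1)) 2)).sum := by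
  have h1 : (bs.foldl pvBbody (pvBbody ([], none) b0)).1 = pvRuns b0 1 bs := by
    have hb : pvBbody ([], none) b0 = ([] ++ [1], some b0) := by simp [pvBbody]
    rw [hb, B_loop bs [] 1 b0]; simp
  simp [ChoiceBall_alt, h1]

lemma A_loop (balls : List Int) : ∀ (d k : Nat), balls.length - k ≤ d →
    ∀ (count cur m : Int),
    ((PySem.List.pyRange (k : Int) ((balls.length : Int) - 1) 1).foldl (pvAbody balls) (count, cur, m)).1
      = count + pvG cur m (balls.drop (k + 1)) := by
  intro d
  induction d with
  | zero =>
    intro k hk count cur m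
    have hk' : balls.length ≤ k := by omega
    rw [PySem.List.pyRange_one_eq_nil (by omega)]
    simp [List.drop_eq_nil_of_le (by omega : balls.length ≤ k + 1), pvG]
  | succ d ih =>
    intro k hk count cur m
    by_cases hlt : k + 1 < balls.length
    · rw [PySem.List.pyRange_one_cons (by omega)]
      have hget : PySem.List.pyGet? balls ((k : Int) + 1) = some balls[k + 1] := by
        have := PySem.List.pyGet?_natCast (xs := balls) (n := k + 1)
        rw [show ((k : Int) + 1) = ((k + 1 : Nat) : Int) by push_cast; ring, this]
        simp [List.getElem?_eq_getElem hlt]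
      have hslice : PySem.List.slice balls (some ((k : Int) + 1)) none = balls.drop (k + 1) := by
        rw [show ((k : Int) + 1) = ((k + 1 : Nat) : Int) by push_cast; ring]
        exact PySem.List.slice_from_natCast balls (k + 1)
      have hdrop : balls.drop (k + 1) = balls[k + 1] :: balls.drop (k + 2) :=
        List.drop_eq_getElem_cons hlt
      rw [List.foldl_cons]
      show ((PySem.List.pyRange ((k : Int) + 1) ((balls.length : Int) - 1) 1).foldl
        (pvAbody balls) (pvAbody balls (count, cur, m) (k : Int))).1 = _
      have hrange : ((k : Int) + 1) = (((k + 1 : Nat)) : Int) := by push_cast; ring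
      by_cases hc : cur = balls[k + 1]
      · have hbody : pvAbody balls (count, cur, m) (k : Int) = (count, cur, m + 1) := by
          simp [pvAbody, hget, hc]
        rw [hbody, hrange, ih (k + 1) (by omega)]
        rw [hdrop]
        simp [pvG, hc]
      · have hbody : pvAbody balls (count, cur, m) (k : Int) =
            (count + ((balls.drop (k + 1)).length : Int) + m * ((balls.drop (k + 1)).length : Int),
             balls[k + 1], 0) := by
          simp only [pvAbody, hget, hslice]
          simp [hc]
        rw [hbody, hrange, ih (k + 1) (by omega)]
        rw [hdrop]
        have hlen : ((balls.drop (k + 1)).length : Int) = ((balls.drop (k + 2)).length : Int) + 1 := by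
          rw [hdrop]; push_cast [List.length_cons]; ring
        simp only [pvG, if_neg hc]
        push_cast [List.length_cons]
        ring
    · rw [PySem.List.pyRange_one_eq_nil (by omega)]
      simp [List.drop_eq_nil_of_le (by omega : balls.length ≤ k + 1), pvG]

lemma A_cons (b0 : Int) (bs : List Int) : ChoiceBall (b0 :: bs) = pvG b0 0 bs := by
  have h0 : PySem.List.pyGet? (b0 :: bs) 0 = some b0 := PySem.List.pyGet?_zero_cons b0 bs
  show (match PySem.List.pyGet? (b0 :: bs) 0 with
    | none => (0 : Int)
    | some b0' => ((PySem.List.pyRange 0 (((b0 :: bs).length : Int) - 1) 1).foldl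
        (pvAbody (b0 :: bs)) (0, b0', 0)).1) = _
  rw [h0]
  have := A_loop (b0 :: bs) (b0 :: bs).length 0 (by omega) 0 b0 0
  simpa using this

-- the combinatorial identity linking A's accumulation to B's run lengths
lemma key (xs : List Int) : ∀ (cur c : Int),
    2 * pvG cur (c - 1) xs + ((pvRuns cur c xs).map (fun L => L * (L - 1))).sum
      = (c + (xs.length : Int)) * (c + (xs.length : Int) - 1) := by
  induction xs with
  | nil => intro cur c; simp [pvG, pvRuns]
  | cons x t ih =>
    intro cur c
    by_cases h : cur = x
    · simp only [pvG, pvRuns, if_pos h]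
      have := ih cur (c + 1)
      rw [show c - 1 + 1 = (c + 1) - 1 by ring]
      push_cast [List.length_cons] at this ⊢
      linarith
    · simp only [pvG, pvRuns, if_neg h, List.map_cons, List.sum_cons]
      have := ih x 1
      rw [show (0 : Int) = 1 - 1 by ring]
      push_cast [List.length_cons] at this ⊢
      nlinarith [this]

lemma even_half (a : Int) : 2 * PySem.Int.floordiv (a * (a - 1)) 2 = a * (a - 1) := by
  rw [PySem.Int.floordiv_eq_ediv_of_pos (by norm_num)]
  have he : Even (a * (a - 1)) := by
    have := Int.even_mul_succ_self (a - 1)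
    simpa [mul_comm, sub_add_cancel] using this
  obtain ⟨k, hk⟩ := he
  omega

lemma sum_half (ls : List Int) :
    2 * (ls.map (fun L => PySem.Int.floordiv (L * (L - 1)) 2)).sum
      = (ls.map (fun L => L * (L - 1))).sum := by
  induction ls with
  | nil => simp
  | cons a t ih =>
    simp only [List.map_cons, List.sum_cons]
    have := even_half a
    linarith

-- ===== VERDICT (by name: the statement is the Claim_ definition above) =====
theorem ChoiceBall_spec : Claim_equal_ChoiceBall := by
  intro balls _ hpre
  unfold Spec_ChoiceBall
  cases balls with
  | nil => exact absurd rfl hpre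
  | cons b0 bs =>
    rw [A_cons, alt_cons]
    have hkey := key bs b0 1
    rw [show (1 : Int) - 1 = 0 by ring] at hkey
    have h1 := even_half (((b0 :: bs).length : Int))
    have h2 := sum_half (pvRuns b0 1 bs)
    push_cast [List.length_cons] at hkey h1 ⊢
    linarith

@[simp]
theorem ChoiceBall_raises : Claim_raises_ChoiceBall := by
  unfold Claim_raises_ChoiceBall
  exact ⟨fun balls _ hr hp => hp hr, by decide⟩
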